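-- pv_equiv track=rewrite | github.com/aanxniee/competitive-programming | others/Lexicographically Least Substring.py | leastSubstring
-- ===== SOURCE A (Python) =====
-- def leastSubstring(s, n):
--     x = s[:n] # ie. str = iloveprogramming, n = 4, x = ilov
--     mn = x # minimum substring
--
--     for i in range(n, len(s)):
--         x = x[1:n] + s[i] # ie. x = love, x = ovep, x = vepr, x = epro...
--
--         if x < mn: # if new x is less than minimum, set it as minimum
--             mn = x
--
--     return mn
-- ===== SOURCE B (Python) =====
-- def leastSubstring(s, n):
--     # Smallest-suffix approach: the lexicographically least window of length n
--     # is the first n characters of the lexicographically least suffix that is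
--     # long enough (i.e. starts at a position <= len(s) - n).
--     L = len(s)
--     if n <= 0:
--         return ""
--     if n >= L:
--         return s[:n]
--     return min(s[i:] for i in range(L - n + 1))[:n]
-- ===== Notes on version B (the rewrite author's own statement) =====
-- stated objective: alternative
-- what changed: Instead of maintaining a rolling length-n window (x = x[1:n] + s[i]) and tracking the running minimum window, B takes the lexicographically smallest sufficiently-long suffix of s and returns its first n characters, relying on the fact that truncation to n characters is monotone for the lexicographic order.
-- outside the precondition, e.g. on leastSubstring('abc', -1): A returns 'a', B returns ''; on leastSubstring('ab', -2): A returns '', B returns ''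
-- crash fix: Whenever n < -len(s), A raises IndexError (s[n] on the loop's first iteration); B returns a value (the empty string). — e.g. on leastSubstring("", -1): A raises IndexError, B returns ""
import Mathlib
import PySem

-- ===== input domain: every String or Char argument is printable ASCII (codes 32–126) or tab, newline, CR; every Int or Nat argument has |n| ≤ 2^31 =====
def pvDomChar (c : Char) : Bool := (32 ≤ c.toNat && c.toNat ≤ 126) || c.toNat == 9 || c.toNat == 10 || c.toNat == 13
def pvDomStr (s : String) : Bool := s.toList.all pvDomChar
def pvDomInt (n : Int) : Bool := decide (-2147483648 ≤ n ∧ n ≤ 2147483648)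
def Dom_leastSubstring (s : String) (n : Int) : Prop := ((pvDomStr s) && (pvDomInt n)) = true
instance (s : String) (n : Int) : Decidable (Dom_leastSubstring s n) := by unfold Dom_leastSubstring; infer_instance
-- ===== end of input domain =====

-- B replaces A's rolling length-n window with running minimum by taking the lexicographically
-- smallest sufficiently-long suffix and truncating it to n characters (alternative algorithm,
-- equal return values; no speed claim).

-- ===== PORT A =====
def leastSubstring (s : String) (n : Int) : String :=
  let cs := s.toList
  let x0 := PySem.List.slice cs none (some n)          -- x = s[:n]; mn = x
  let r := (PySem.List.pyRange n (PySem.List.len cs) 1).foldl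
    (fun (st : List Char × List Char) i =>
      let x := PySem.List.slice st.1 (some 1) (some n) ++ [PySem.List.pyGetD cs i ' ']  -- x = x[1:n] + s[i]
      (x, if x < st.2 then x else st.2))               -- if x < mn: mn = x
    (x0, x0)
  String.ofList r.2

-- ===== PORT B =====
def leastSubstring_alt (s : String) (n : Int) : String :=
  let cs := s.toList
  let L : Int := PySem.List.len cs
  if n ≤ 0 then ""                                     -- if n <= 0: return ""
  else if L ≤ n then                                   -- if n >= len(s): return s[:n]
    String.ofList (PySem.List.slice cs none (some n))
  else
    let suffixes := (PySem.List.pyRange 0 (L - n + 1) 1).map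
      (fun i => PySem.List.slice cs (some i) none)     -- [s[i:] for i in range(L - n + 1)]
    String.ofList (PySem.List.slice ((PySem.List.min? suffixes (fun x => x)).getD [])
      none (some n))                                   -- min(suffixes)[:n]

-- ===== PRECONDITION & SPEC =====
-- Pre_ requires n ≥ 0: negative n is outside the natural domain of "length-n substring" —
-- there A's negative slicing yields accidental values (e.g. "a" for ("abc", -1)) or raises
-- IndexError (whenever n < -len(s)).
def Pre_leastSubstring (s : String) (n : Int) : Prop := 0 ≤ n
instance (s : String) (n : Int) : Decidable (Pre_leastSubstring s n) := by unfold Pre_leastSubstring; infer_instance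
def pvWitness_leastSubstring : String × Int := ("ab", 1)

-- Whenever n < -len(s), A raises IndexError (s[n] on the loop's first iteration); B returns a value.
def Raises_leastSubstring (s : String) (n : Int) : Prop := n < -(PySem.Str.len s)
instance (s : String) (n : Int) : Decidable (Raises_leastSubstring s n) := by unfold Raises_leastSubstring; infer_instance
def pvRaiseWitness_leastSubstring : String × Int := ("", -1)
def pvRaiseWitnessOut_leastSubstring : String := ""

def Spec_leastSubstring (s : String) (n : Int) (out : String) : Prop := out = leastSubstring_alt s n
instance (s : String) (n : Int) (out : String) : Decidable (Spec_leastSubstring s n out) := by unfold Spec_leastSubstring; infer_instance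

-- ===== CLAIM (what is proved, stated in full; the proofs are below) =====
def Claim_equal_leastSubstring : Prop := ∀ (s : String) (n : Int), Dom_leastSubstring s n → Pre_leastSubstring s n → Spec_leastSubstring s n (leastSubstring s n)
def Claim_raises_leastSubstring : Prop := (∀ (s : String) (n : Int), Dom_leastSubstring s n → Raises_leastSubstring s n → ¬ Pre_leastSubstring s n) ∧ (Dom_leastSubstring (pvRaiseWitness_leastSubstring.1) (pvRaiseWitness_leastSubstring.2) ∧ Raises_leastSubstring (pvRaiseWitness_leastSubstring.1) (pvRaiseWitness_leastSubstring.2) ∧ leastSubstring_alt (pvRaiseWitness_leastSubstring.1) (pvRaiseWitness_leastSubstring.2) = pvRaiseWitnessOut_leastSubstring)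

-- ===== LEMMAS AND PROOFS =====

-- truncation is monotone for the lexicographic order on character lists
theorem pvTakeMonoLex (n : Nat) {a b : List Char} (h : List.Lex (fun x y : Char => x < y) a b) :
    a.take n ≤ b.take n := by
  induction h generalizing n with
  | nil =>
    cases n with
    | zero => exact le_refl _
    | succ n =>
      exact le_of_lt (show ([] : List Char) < _ from List.Lex.nil)
  | @cons x xs ys h ih =>
    cases n with
    | zero => exact le_refl _
    | succ n =>
      simp only [List.take_succ_cons]
      exact List.cons_le_cons x (ih n)
  | @rel x y xs ys hxy =>
    cases n with
    | zero => exact le_refl _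
    | succ n =>
      simp only [List.take_succ_cons]
      exact le_of_lt (List.cons_lt_cons_iff.mpr (Or.inl hxy))

theorem pvTakeMono (n : Nat) {a b : List Char} (h : a ≤ b) : a.take n ≤ b.take n := by
  rcases lt_or_eq_of_le h with h | h
  · exact pvTakeMonoLex n h
  · subst h; exact le_refl _

theorem pvTakeMin (n : Nat) (a b : List Char) : (min a b).take n = min (a.take n) (b.take n) := by
  rcases le_total a b with h | h
  · rw [min_eq_left h, min_eq_left (pvTakeMono n h)]
  · rw [min_eq_right h, min_eq_right (pvTakeMono n h)]

theorem pvFoldlMinTake (n : Nat) (l : List (List Char)) (a : List Char) :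
    (l.foldl min a).take n = (l.map (List.take n)).foldl min (a.take n) := by
  induction l generalizing a with
  | nil => rfl
  | cons x t ih => simp only [List.foldl_cons, List.map_cons, ih, pvTakeMin]

theorem pvIfLtMin (a x : List Char) : (if x < a then x else a) = min a x := by
  rcases le_total a x with h | h
  · rw [min_eq_left h, if_neg (not_lt.mpr h)]
  · rcases lt_or_eq_of_le h with h' | h'
    · rw [min_eq_right h, if_pos h']
    · subst h'; simp

-- one step of A's rolling window: x[1:n] + s[j+n] is the window starting at j+1
theorem pvStepA (cs : List Char) (nn j : Nat) (h1 : 1 ≤ nn) (h2 : j + nn < cs.length) :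
    PySem.List.slice ((cs.drop j).take nn) (some 1) (some (nn : Int)) ++
      [PySem.List.pyGetD cs ((j + nn : Nat) : Int) ' ']
    = (cs.drop (j + 1)).take nn := by
  rw [PySem.List.slice_toNat _ (by norm_num) (Int.natCast_nonneg nn)]
  simp only [Int.toNat_one, Int.toNat_natCast, PySem.List.pyGetD_natCast]
  rw [List.drop_take, List.drop_drop, List.take_take]
  have h2' : j + nn < cs.length := h2
  have hget : cs.getD (j + nn) ' ' = cs[j + nn]'h2' := List.getD_eq_getElem _ _ h2'
  have hget2 : (cs.drop (j + 1))[nn - 1]? = some (cs[j + nn]'h2') := by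
    rw [List.getElem?_drop]
    have : j + 1 + (nn - 1) = j + nn := by omega
    rw [this, List.getElem?_eq_getElem h2']
  have hnn : nn = (nn - 1) + 1 := by omega
  conv_rhs => rw [hnn, List.take_add_one, hget2]
  rw [hget]
  congr 2
  omega

-- characterisation of A's fold: the running minimum is the fold of min over the windows
theorem pvFoldA (cs : List Char) (nn : Nat) (h1 : 1 ≤ nn) :
    ∀ (m j : Nat) (acc : List Char), j + nn + m = cs.length →
    ((PySem.List.pyRange ((j + nn : Nat) : Int) ((cs.length : Nat) : Int) 1).foldl
      (fun (st : List Char × List Char) i =>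
        let x := PySem.List.slice st.1 (some 1) (some ((nn : Nat) : Int)) ++ [PySem.List.pyGetD cs i ' ']
        (x, if x < st.2 then x else st.2))
      ((cs.drop j).take nn, acc)).2
    = ((List.range m).map (fun k => (cs.drop (j + 1 + k)).take nn)).foldl min acc := by
  intro m
  induction m with
  | zero =>
    intro j acc hlen
    rw [PySem.List.pyRange_one_eq_nil (by omega), List.foldl_nil]
    simp
  | succ m ih =>
    intro j acc hlen
    rw [PySem.List.pyRange_one_cons (by exact_mod_cast by omega), List.foldl_cons]
    simp only []
    rw [pvStepA cs nn j h1 (by omega)]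
    have hcast : ((j + nn : Nat) : Int) + 1 = (((j + 1) + nn : Nat) : Int) := by push_cast; ring
    rw [pvIfLtMin, hcast, ih (j + 1) (min acc ((cs.drop (j+1)).take nn)) (by omega)]
    rw [List.range_succ_eq_map]
    simp only [List.map_cons, List.foldl_cons, List.map_map]
    have hmap : List.map ((fun k => List.take nn (List.drop (j + 1 + k) cs)) ∘ Nat.succ) (List.range m)
        = List.map (fun k => List.take nn (List.drop (j + 1 + 1 + k) cs)) (List.range m) := by
      apply List.map_congr_left
      intro a _
      simp only [Function.comp]
      congr 2
      omega
    rw [hmap]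

-- Python's min(xs) with no key is the running-min fold (stated with the instances the port uses)
theorem pvMinIdCons (x : List Char) (l : List (List Char)) :
    PySem.List.min? (x :: l) (fun y => y) = some (l.foldl min x) := by
  have h : (fun (a b : List Char) => a.decidableLT b) = (LinearOrder.toDecidableLT) := by
    funext a b; exact Subsingleton.elim _ _
  rw [h]
  exact PySem.List.min?_id_cons x l

theorem pvFoldNilSnd (cs : List Char) (nval : Int) :
    ∀ (l : List Int) (st : List Char),
    (l.foldl (fun (st : List Char × List Char) i =>
        let x := PySem.List.slice st.1 (some 1) (some nval) ++ [PySem.List.pyGetD cs i ' ']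
        (x, if x < st.2 then x else st.2)) (st, [])).2 = [] := by
  intro l
  induction l with
  | nil => intro st; rfl
  | cons h t ih =>
    intro st
    rw [List.foldl_cons]
    simp only []
    rw [if_neg (List.not_lt_nil _)]
    exact ih _

theorem pvMain (s : String) (n : Int) (hpre : 0 ≤ n) :
    leastSubstring s n = leastSubstring_alt s n := by
  obtain ⟨nn, rfl⟩ : ∃ m : Nat, n = (m : Int) :=
    ⟨n.toNat, (Int.toNat_of_nonneg (by omega)).symm⟩
  set cs := s.toList with hcs
  rcases Nat.eq_zero_or_pos nn with h0 | hnn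
  · -- n = 0: both programs return the empty string
    subst h0
    unfold leastSubstring leastSubstring_alt
    simp only [PySem.List.len_eq, ← hcs]
    rw [if_pos (by norm_num : ((0 : Nat) : Int) ≤ 0)]
    have hz : PySem.List.slice cs none (some ((0 : Nat) : Int)) = [] := by
      rw [PySem.List.slice_to_natCast]; exact List.take_zero
    rw [hz, pvFoldNilSnd]
  · by_cases hL : (cs.length : Int) ≤ (nn : Int)
    · unfold leastSubstring leastSubstring_alt
      simp only [PySem.List.len_eq, ← hcs]
      rw [if_neg (by exact_mod_cast (by omega : ¬ ((nn : Int) ≤ 0))), if_pos hL,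
        PySem.List.pyRange_one_eq_nil hL, List.foldl_nil]
    · unfold leastSubstring leastSubstring_alt
      simp only [PySem.List.len_eq, ← hcs]
      rw [if_neg (by exact_mod_cast (by omega : ¬ ((nn : Int) ≤ 0))), if_neg hL]
      have hnn : 1 ≤ nn := hnn
      have hlt : nn < cs.length := by exact_mod_cast not_le.mp hL
      set K : Nat := cs.length - nn with hK
      -- A's result is the fold of min over all windows
      have hA := pvFoldA cs nn hnn K 0 (PySem.List.slice cs none (some (nn : Int))) (by omega)
      have hslice0 : PySem.List.slice cs none (some (nn : Int)) = cs.take nn :=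
        PySem.List.slice_to_natCast cs nn
      rw [hslice0] at hA ⊢
      have hdz : (cs.drop 0).take nn = cs.take nn := by rw [List.drop_zero]
      rw [hdz] at hA
      simp only [Nat.zero_add] at hA
      rw [hA]
      -- B's result is the truncated fold of min over all sufficiently-long suffixes
      have hrange : (cs.length : Int) - (nn : Int) + 1 = ((K + 1 : Nat) : Int) := by push_cast; omega
      rw [hrange, PySem.List.pyRange_zero_nat]
      rw [List.map_map]
      have hsufs : List.map ((fun i => PySem.List.slice cs (some i) none) ∘ (fun k : Nat => (k : Int)))
          (List.range (K + 1)) = List.map (fun k : Nat => cs.drop k) (List.range (K + 1)) := by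
        apply List.map_congr_left
        intro a _
        simp only [Function.comp]
        exact PySem.List.slice_from_natCast cs a
      rw [hsufs, List.range_succ_eq_map, List.map_cons]
      rw [pvMinIdCons, Option.getD_some]
      rw [PySem.List.slice_to_natCast, List.drop_zero, pvFoldlMinTake, List.map_map, List.map_map]
      congr 1
      refine congrArg (List.foldl min (List.take nn cs)) ?_
      apply List.map_congr_left
      intro a _
      simp only [Function.comp]
      congr 2
      omega

-- ===== VERDICT (by name: the statement is the Claim_ definition above) =====
theorem leastSubstring_spec : Claim_equal_leastSubstring := by
  intro s n _ hpre
  exact pvMain s n hpre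

theorem leastSubstring_raises : Claim_raises_leastSubstring := by
  unfold Claim_raises_leastSubstring
  refine ⟨?_, by decide⟩
  intro s n _ hr
  unfold Raises_leastSubstring at hr
  unfold Pre_leastSubstring
  have h0 : (0 : Int) ≤ PySem.Str.len s := by
    rw [PySem.Str.len_eq]; exact_mod_cast Int.natCast_nonneg _
  omega

-- self-check: the raise witness is inside Raises_ and B's port returns the stated value there
theorem pvRaiseWitness_ok :
    Raises_leastSubstring pvRaiseWitness_leastSubstring.1 pvRaiseWitness_leastSubstring.2 ∧
    leastSubstring_alt pvRaiseWitness_leastSubstring.1 pvRaiseWitness_leastSubstring.2 = pvRaiseWitnessOut_leastSubstring :=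
  ⟨leastSubstring_raises.2.2.1, leastSubstring_raises.2.2.2⟩
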